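-- pv_equiv track=rewrite | github.com/FoxSys285/SokobanAI | A_Star.py | get_static_deadlocks
-- ===== SOURCE A (Python) =====
-- def get_static_deadlocks(board, goals):
--     rows = len(board)
--     cols = len(board[0])
--     deadlocks = set()
--     goals_set = set(goals)
--
--     for y in range(rows):
--         for x in range(cols):
--             if board[y][x] == 1 or (x, y) in goals_set:
--                 continue
--
--             # Kiểm tra biên an toàn
--             up    = board[y-1][x] == 1 if y > 0 else True
--             down  = board[y+1][x] == 1 if y < rows - 1 else True
--             left  = board[y][x-1] == 1 if x > 0 else True
--             right = board[y][x+1] == 1 if x < cols - 1 else True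
--
--             # 1. Corner Deadlock
--             if (up and left) or (up and right) or (down and left) or (down and right):
--                 deadlocks.add((x, y))
--                 continue
--
--             # 2. Line Deadlock
--             if up or down:
--                 if not has_goal_on_wall_segment(x, y, board, goals_set, horizontal=True):
--                     deadlocks.add((x, y))
--             elif left or right:
--                 if not has_goal_on_wall_segment(x, y, board, goals_set, horizontal=False):
--                     deadlocks.add((x, y))
--
--     return deadlocks
--
-- def has_goal_on_wall_segment(x, y, board, goals, horizontal=True):
--     """Kiểm tra dọc theo bức tường xem có ô đích nào không."""
--     rows = len(board)
--     cols = len(board[0])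
--
--     if horizontal:
--         for direction in [-1, 1]:
--             curr_x = x
--             while True:
--                 curr_x += direction
--                 # Kiểm tra biên trước khi truy cập mảng
--                 if not (0 <= curr_x < cols):
--                     break
--                 if board[y][curr_x] == 1:
--                     break # Chạm tường vuông góc
--                 if (curr_x, y) in goals:
--                     return True
--                 # Nếu bỗng nhiên mất tường song song (trên và dưới) thì đây là lối thoát
--                 has_wall_above = (y > 0 and board[y-1][curr_x] == 1)
--                 has_wall_below = (y < rows - 1 and board[y+1][curr_x] == 1)
--                 if not has_wall_above and not has_wall_below:
--                     return True
--     else: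
--         for direction in [-1, 1]:
--             curr_y = y
--             while True:
--                 curr_y += direction
--                 # Kiểm tra biên trước khi truy cập mảng
--                 if not (0 <= curr_y < rows):
--                     break
--                 if board[curr_y][x] == 1:
--                     break
--                 if (x, curr_y) in goals:
--                     return True
--                 # Nếu bỗng nhiên mất tường song song (trái và phải) thì đây là lối thoát
--                 has_wall_left = (x > 0 and board[curr_y][x-1] == 1)
--                 has_wall_right = (x < cols - 1 and board[curr_y][x+1] == 1)
--                 if not has_wall_left and not has_wall_right:
--                     return True
--     return False
-- ===== SOURCE B (Python) =====
-- def get_static_deadlocks(board, goals):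
--     rows, cols = len(board), len(board[0])
--     goals_set = set(goals)
--
--     def wall(y, x):
--         return board[y][x] == 1
--
--     def exit_h(y, x):
--         # a box in row y escapes at column x: goal, or no wall above nor below
--         return (x, y) in goals_set or not (
--             (y > 0 and wall(y - 1, x)) or (y < rows - 1 and wall(y + 1, x)))
--
--     def exit_v(y, x):
--         return (x, y) in goals_set or not (
--             (x > 0 and wall(y, x - 1)) or (x < cols - 1 and wall(y, x + 1)))
--
--     def sweep(indices, wall_at, exit_at):
--         # one DP pass: acc = "an exit cell seen since the last wall"
--         acc, out = False, []
--         for i in indices: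
--             acc = (not wall_at(i)) and (exit_at(i) or acc)
--             out.append(acc)
--         return out
--
--     # L[y][x]: exit_h cell reachable going left from x (inclusive) with no wall between;
--     # R[y][x]: same going right; U[x][y] / D[x][y]: vertical analogues, column-major.
--     L = [sweep(range(cols), lambda x: wall(y, x), lambda x: exit_h(y, x))
--          for y in range(rows)]
--     R = [list(reversed(sweep(range(cols - 1, -1, -1), lambda x: wall(y, x), lambda x: exit_h(y, x))))
--          for y in range(rows)]
--     U = [sweep(range(rows), lambda y: wall(y, x), lambda y: exit_v(y, x))
--          for x in range(cols)]
--     D = [list(reversed(sweep(range(rows - 1, -1, -1), lambda y: wall(y, x), lambda y: exit_v(y, x))))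
--          for x in range(cols)]
--
--     def dead(y, x):
--         blocked_v = y == 0 or y == rows - 1 or wall(y - 1, x) or wall(y + 1, x)
--         blocked_h = x == 0 or x == cols - 1 or wall(y, x - 1) or wall(y, x + 1)
--         if blocked_v and blocked_h:
--             return True                       # corner
--         if blocked_v:                         # pushes run along the row (0 < x < cols-1 here)
--             return not (L[y][x - 1] or R[y][x + 1])
--         if blocked_h:                         # pushes run along the column (0 < y < rows-1 here)
--             return not (U[x][y - 1] or D[x][y + 1])
--         return False
--
--     return {(x, y) for y in range(rows) for x in range(cols)
--             if not wall(y, x) and (x, y) not in goals_set and dead(y, x)}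
-- ===== Notes on version B (the rewrite author's own statement) =====
-- stated objective: alternative
-- what changed: A rescans the row/column wall segment outward from every candidate cell to decide line deadlocks; B precomputes four prefix/suffix DP escape tables (one sweep per row and per column), factors the corner test into (blocked vertically) AND (blocked horizontally), and labels cells with a set comprehension reading two table entries. Worst-case asymptotics improve (O(R*C) vs O(R*C*(R+C))) but on the generated inputs A's early-exit scans are short, so B was not measured faster.
import Mathlib
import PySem

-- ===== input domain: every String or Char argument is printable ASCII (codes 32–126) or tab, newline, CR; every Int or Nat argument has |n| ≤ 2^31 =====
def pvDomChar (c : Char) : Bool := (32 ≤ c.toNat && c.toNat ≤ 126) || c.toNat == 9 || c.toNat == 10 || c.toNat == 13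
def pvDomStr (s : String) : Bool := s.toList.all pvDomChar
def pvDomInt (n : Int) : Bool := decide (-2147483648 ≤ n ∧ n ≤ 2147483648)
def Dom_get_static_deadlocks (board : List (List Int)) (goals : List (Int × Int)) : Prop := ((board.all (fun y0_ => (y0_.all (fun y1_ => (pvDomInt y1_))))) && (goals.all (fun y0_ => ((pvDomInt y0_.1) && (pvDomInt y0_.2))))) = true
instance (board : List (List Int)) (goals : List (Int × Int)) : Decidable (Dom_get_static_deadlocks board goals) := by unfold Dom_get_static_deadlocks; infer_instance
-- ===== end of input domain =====

-- B replaces A's per-cell bidirectional wall-segment scans by four precomputed DP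
-- reachability tables (one prefix and one suffix pass per row and per column) and labels
-- every cell with a single classifier read off the tables via a set comprehension
-- (alternative algorithm; not measured faster on the generated inputs).

-- ===== PORT A =====
-- board[y][x]: every access either program performs is inside the bounds guards shown,
-- where pyGetD is exact.
def pvCell (board : List (List Int)) (y x : Int) : Int :=
  PySem.List.pyGetD (PySem.List.pyGetD board y []) x 0

-- board[y][x] == 1
def pvWall (board : List (List Int)) (y x : Int) : Bool := pvCell board y x == 1

-- the 'while True' loop of has_goal_on_wall_segment, horizontal case, one direction.
-- It advances one step per iteration and leaves [0, cols) at the latest after cols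
-- steps, so the fuel (cols.toNat + 1 at the call site) is never exhausted.
def pvScanH (board : List (List Int)) (gs : List (Int × Int)) (rows cols y dir : Int) :
    Int → Nat → Bool
  | _, 0 => false
  | curr, fuel + 1 =>
    let c := curr + dir
    if !(decide (0 ≤ c) && decide (c < cols)) then false
    else if pvWall board y c then false
    else if gs.contains (c, y) then true
    else if !(decide (0 < y) && pvWall board (y - 1) c)
            && !(decide (y < rows - 1) && pvWall board (y + 1) c) then true
    else pvScanH board gs rows cols y dir c fuel

-- the vertical case
def pvScanV (board : List (List Int)) (gs : List (Int × Int)) (rows cols x dir : Int) :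
    Int → Nat → Bool
  | _, 0 => false
  | curr, fuel + 1 =>
    let c := curr + dir
    if !(decide (0 ≤ c) && decide (c < rows)) then false
    else if pvWall board c x then false
    else if gs.contains (x, c) then true
    else if !(decide (0 < x) && pvWall board c (x - 1))
            && !(decide (x < cols - 1) && pvWall board c (x + 1)) then true
    else pvScanV board gs rows cols x dir c fuel

def pvHasGoalOnWallSegment (x y : Int) (board : List (List Int)) (gs : List (Int × Int))
    (horizontal : Bool) : Bool :=
  let rows : Int := board.length
  let cols : Int := (PySem.List.pyGetD board 0 []).length
  if horizontal then
    pvScanH board gs rows cols y (-1) x (cols.toNat + 1)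
      || pvScanH board gs rows cols y 1 x (cols.toNat + 1)
  else
    pvScanV board gs rows cols x (-1) y (rows.toNat + 1)
      || pvScanV board gs rows cols x 1 y (rows.toNat + 1)

def get_static_deadlocks (board : List (List Int)) (goals : List (Int × Int)) :
    List (Int × Int) :=
  let rows : Int := board.length
  let cols : Int := (PySem.List.pyGetD board 0 []).length
  let gs : PySem.Set (Int × Int) := PySem.Set.ofList goals
  (PySem.List.pyRange 0 rows 1).foldl (fun dl y =>
    (PySem.List.pyRange 0 cols 1).foldl (fun dl x =>
      if pvWall board y x || PySem.Set.contains gs (x, y) then dl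
      else
        let up := if 0 < y then pvWall board (y - 1) x else true
        let down := if y < rows - 1 then pvWall board (y + 1) x else true
        let left := if 0 < x then pvWall board y (x - 1) else true
        let right := if x < cols - 1 then pvWall board y (x + 1) else true
        if (up && left) || (up && right) || (down && left) || (down && right) then
          PySem.Set.add dl (x, y)
        else if up || down then
          if !pvHasGoalOnWallSegment x y board gs true then PySem.Set.add dl (x, y) else dl
        else if left || right then
          if !pvHasGoalOnWallSegment x y board gs false then PySem.Set.add dl (x, y) else dl
        else dl) dl) PySem.Set.empty

-- ===== PORT B =====
-- exit_h / exit_v of Source B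
def pvExitH (board : List (List Int)) (gs : List (Int × Int)) (rows y x : Int) : Bool :=
  gs.contains (x, y)
    || !((decide (0 < y) && pvWall board (y - 1) x)
         || (decide (y < rows - 1) && pvWall board (y + 1) x))

def pvExitV (board : List (List Int)) (gs : List (Int × Int)) (cols y x : Int) : Bool :=
  gs.contains (x, y)
    || !((decide (0 < x) && pvWall board y (x - 1))
         || (decide (x < cols - 1) && pvWall board y (x + 1)))

-- sweep(indices, wall_at, exit_at) of Source B: one DP pass with accumulator acc
def pvSweep (idx : List Int) (w s : Int → Bool) : List Bool :=
  (idx.foldl (fun (p : List Bool × Bool) i =>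
    let a := !w i && (s i || p.2)
    (p.1 ++ [a], a)) ([], false)).1

-- t[i][j] (both indices guarded nonnegative and in range at every use)
def pvLook (t : List (List Bool)) (i j : Int) : Bool :=
  PySem.List.pyGetD (PySem.List.pyGetD t i []) j false

-- dead(y, x) of Source B
def pvDead (board : List (List Int)) (rows cols : Int) (L R U D : List (List Bool))
    (y x : Int) : Bool :=
  let bv := decide (y = 0) || decide (y = rows - 1)
            || pvWall board (y - 1) x || pvWall board (y + 1) x
  let bh := decide (x = 0) || decide (x = cols - 1)
            || pvWall board y (x - 1) || pvWall board y (x + 1)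
  if bv && bh then true
  else if bv then !(pvLook L y (x - 1) || pvLook R y (x + 1))
  else if bh then !(pvLook U x (y - 1) || pvLook D x (y + 1))
  else false

def get_static_deadlocks_alt (board : List (List Int)) (goals : List (Int × Int)) :
    List (Int × Int) :=
  let rows : Int := board.length
  let cols : Int := (PySem.List.pyGetD board 0 []).length
  let gs : PySem.Set (Int × Int) := PySem.Set.ofList goals
  let L := (PySem.List.pyRange 0 rows 1).map (fun y =>
    pvSweep (PySem.List.pyRange 0 cols 1)
      (fun x => pvWall board y x) (fun x => pvExitH board gs rows y x))
  let R := (PySem.List.pyRange 0 rows 1).map (fun y =>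
    (pvSweep (PySem.List.pyRange (cols - 1) (-1) (-1))
      (fun x => pvWall board y x) (fun x => pvExitH board gs rows y x)).reverse)
  let U := (PySem.List.pyRange 0 cols 1).map (fun x =>
    pvSweep (PySem.List.pyRange 0 rows 1)
      (fun y => pvWall board y x) (fun y => pvExitV board gs cols y x))
  let D := (PySem.List.pyRange 0 cols 1).map (fun x =>
    (pvSweep (PySem.List.pyRange (rows - 1) (-1) (-1))
      (fun y => pvWall board y x) (fun y => pvExitV board gs cols y x)).reverse)
  PySem.Set.ofList ((PySem.List.pyRange 0 rows 1).flatMap (fun y =>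
    ((PySem.List.pyRange 0 cols 1).filter (fun x =>
      !pvWall board y x && !PySem.Set.contains gs (x, y)
        && pvDead board rows cols L R U D y x)).map (fun x => (x, y))))

-- ===== PRECONDITION & SPEC =====
-- Pre_ excludes exactly the inputs on which the Python raises IndexError:
-- an empty board (board[0]) and boards whose some row is shorter than len(board[0]).
def Pre_get_static_deadlocks (board : List (List Int)) (goals : List (Int × Int)) : Prop :=
  board ≠ [] ∧ ∀ r ∈ board, (board.headD []).length ≤ r.length

instance (board : List (List Int)) (goals : List (Int × Int)) :
    Decidable (Pre_get_static_deadlocks board goals) := by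
  unfold Pre_get_static_deadlocks; infer_instance

def pvWitness_get_static_deadlocks : List (List Int) × (List (Int × Int)) :=
  ([[0, 1], [1, 0]], [(0, 0)])

def Spec_get_static_deadlocks (board : List (List Int)) (goals : List (Int × Int)) (out : List (Int × Int)) : Prop := out = get_static_deadlocks_alt board goals
instance (board : List (List Int)) (goals : List (Int × Int)) (out : List (Int × Int)) : Decidable (Spec_get_static_deadlocks board goals out) := by unfold Spec_get_static_deadlocks; infer_instance

-- ===== CLAIM (what is proved, stated in full; the proofs are below) =====
def Claim_equal_get_static_deadlocks : Prop := ∀ (board : List (List Int)) (goals : List (Int × Int)), Dom_get_static_deadlocks board goals → Pre_get_static_deadlocks board goals → Spec_get_static_deadlocks board goals (get_static_deadlocks board goals)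

-- ===== LEMMAS AND PROOFS =====

-- "an exit cell at index ≤ i of this line, with no wall at or after it up to i"
-- (the value Source B's forward sweep stores at index i; false outside [0, n))
def fFwd (w s : Int → Bool) (n : Int) (i : Int) : Bool :=
  if h : 0 ≤ i ∧ i < n then !w i && (s i || fFwd w s n (i - 1)) else false
termination_by (i + 1).toNat
decreasing_by omega

-- the backward analogue: "an exit cell at index ≥ i, no wall in between"
def fBwd (w s : Int → Bool) (n : Int) (i : Int) : Bool :=
  if h : 0 ≤ i ∧ i < n then !w i && (s i || fBwd w s n (i + 1)) else false
termination_by (n - i).toNat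
decreasing_by omega

theorem scanH_neg (board : List (List Int)) (gs : List (Int × Int)) (rows cols y : Int) :
    ∀ (fuel : Nat) (curr : Int), (curr + 1).toNat < fuel →
    pvScanH board gs rows cols y (-1) curr fuel =
      fFwd (fun x => pvWall board y x) (fun x => pvExitH board gs rows y x) cols (curr - 1) := by
  intro fuel
  induction fuel with
  | zero => intro curr h; omega
  | succ f ih =>
    intro curr h
    rw [pvScanH, fFwd]
    simp only [show curr + -1 = curr - 1 from by ring]
    by_cases h1 : 0 ≤ curr - 1 ∧ curr - 1 < cols
    · rw [dif_pos h1]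
      have hb : (!(decide (0 ≤ curr - 1) && decide (curr - 1 < cols))) = false := by
        simp only [Bool.not_eq_false', Bool.and_eq_true, decide_eq_true_eq]; exact h1
      rw [hb]
      cases hw : pvWall board y (curr - 1) with
      | true => simp
      | false =>
        rw [pvExitH]
        cases hg : gs.contains (curr - 1, y) with
        | true => simp
        | false =>
          rw [← Bool.not_or]
          cases ho : (decide (0 < y) && pvWall board (y - 1) (curr - 1))
              || (decide (y < rows - 1) && pvWall board (y + 1) (curr - 1)) with
          | false => simp
          | true =>
            simp only [Bool.not_true, Bool.false_eq_true, if_false, Bool.false_or,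
              Bool.not_false, Bool.true_and]
            exact ih (curr - 1) (by omega)
    · rw [dif_neg h1]
      have hb : (!(decide (0 ≤ curr - 1) && decide (curr - 1 < cols))) = true := by
        simp only [Bool.not_eq_true', Bool.and_eq_false_iff, decide_eq_false_iff_not]
        omega
      rw [hb]
      simp

theorem scanH_pos (board : List (List Int)) (gs : List (Int × Int)) (rows cols y : Int) :
    ∀ (fuel : Nat) (curr : Int), (cols - curr).toNat < fuel →
    pvScanH board gs rows cols y 1 curr fuel =
      fBwd (fun x => pvWall board y x) (fun x => pvExitH board gs rows y x) cols (curr + 1) := by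
  intro fuel
  induction fuel with
  | zero => intro curr h; omega
  | succ f ih =>
    intro curr h
    rw [pvScanH, fBwd]
    by_cases h1 : 0 ≤ curr + 1 ∧ curr + 1 < cols
    · rw [dif_pos h1]
      have hb : (!(decide (0 ≤ curr + 1) && decide (curr + 1 < cols))) = false := by
        simp only [Bool.not_eq_false', Bool.and_eq_true, decide_eq_true_eq]; exact h1
      rw [hb]
      cases hw : pvWall board y (curr + 1) with
      | true => simp
      | false =>
        rw [pvExitH]
        cases hg : gs.contains (curr + 1, y) with
        | true => simp
        | false =>
          rw [← Bool.not_or]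
          cases ho : (decide (0 < y) && pvWall board (y - 1) (curr + 1))
              || (decide (y < rows - 1) && pvWall board (y + 1) (curr + 1)) with
          | false => simp
          | true =>
            simp only [Bool.not_true, Bool.false_eq_true, if_false, Bool.false_or,
              Bool.not_false, Bool.true_and]
            exact ih (curr + 1) (by omega)
    · rw [dif_neg h1]
      have hb : (!(decide (0 ≤ curr + 1) && decide (curr + 1 < cols))) = true := by
        simp only [Bool.not_eq_true', Bool.and_eq_false_iff, decide_eq_false_iff_not]
        omega
      rw [hb]
      simp

theorem scanV_neg (board : List (List Int)) (gs : List (Int × Int)) (rows cols x : Int) :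
    ∀ (fuel : Nat) (curr : Int), (curr + 1).toNat < fuel →
    pvScanV board gs rows cols x (-1) curr fuel =
      fFwd (fun y => pvWall board y x) (fun y => pvExitV board gs cols y x) rows (curr - 1) := by
  intro fuel
  induction fuel with
  | zero => intro curr h; omega
  | succ f ih =>
    intro curr h
    rw [pvScanV, fFwd]
    simp only [show curr + -1 = curr - 1 from by ring]
    by_cases h1 : 0 ≤ curr - 1 ∧ curr - 1 < rows
    · rw [dif_pos h1]
      have hb : (!(decide (0 ≤ curr - 1) && decide (curr - 1 < rows))) = false := by
        simp only [Bool.not_eq_false', Bool.and_eq_true, decide_eq_true_eq]; exact h1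
      rw [hb]
      cases hw : pvWall board (curr - 1) x with
      | true => simp
      | false =>
        rw [pvExitV]
        cases hg : gs.contains (x, curr - 1) with
        | true => simp
        | false =>
          rw [← Bool.not_or]
          cases ho : (decide (0 < x) && pvWall board (curr - 1) (x - 1))
              || (decide (x < cols - 1) && pvWall board (curr - 1) (x + 1)) with
          | false => simp
          | true =>
            simp only [Bool.not_true, Bool.false_eq_true, if_false, Bool.false_or,
              Bool.not_false, Bool.true_and]
            exact ih (curr - 1) (by omega)
    · rw [dif_neg h1]
      have hb : (!(decide (0 ≤ curr - 1) && decide (curr - 1 < rows))) = true := by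
        simp only [Bool.not_eq_true', Bool.and_eq_false_iff, decide_eq_false_iff_not]
        omega
      rw [hb]
      simp

theorem scanV_pos (board : List (List Int)) (gs : List (Int × Int)) (rows cols x : Int) :
    ∀ (fuel : Nat) (curr : Int), (rows - curr).toNat < fuel →
    pvScanV board gs rows cols x 1 curr fuel =
      fBwd (fun y => pvWall board y x) (fun y => pvExitV board gs cols y x) rows (curr + 1) := by
  intro fuel
  induction fuel with
  | zero => intro curr h; omega
  | succ f ih =>
    intro curr h
    rw [pvScanV, fBwd]
    by_cases h1 : 0 ≤ curr + 1 ∧ curr + 1 < rows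
    · rw [dif_pos h1]
      have hb : (!(decide (0 ≤ curr + 1) && decide (curr + 1 < rows))) = false := by
        simp only [Bool.not_eq_false', Bool.and_eq_true, decide_eq_true_eq]; exact h1
      rw [hb]
      cases hw : pvWall board (curr + 1) x with
      | true => simp
      | false =>
        rw [pvExitV]
        cases hg : gs.contains (x, curr + 1) with
        | true => simp
        | false =>
          rw [← Bool.not_or]
          cases ho : (decide (0 < x) && pvWall board (curr + 1) (x - 1))
              || (decide (x < cols - 1) && pvWall board (curr + 1) (x + 1)) with
          | false => simp
          | true =>
            simp only [Bool.not_true, Bool.false_eq_true, if_false, Bool.false_or,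
              Bool.not_false, Bool.true_and]
            exact ih (curr + 1) (by omega)
    · rw [dif_neg h1]
      have hb : (!(decide (0 ≤ curr + 1) && decide (curr + 1 < rows))) = true := by
        simp only [Bool.not_eq_true', Bool.and_eq_false_iff, decide_eq_false_iff_not]
        omega
      rw [hb]
      simp

theorem sweep_fwd_aux (w s : Int → Bool) (n : Int) :
    ∀ (k : Nat) (a : Int) (out : List Bool), a = n - k → 0 ≤ a →
    (PySem.List.pyRange a n 1).foldl (fun (p : List Bool × Bool) i =>
        let a := !w i && (s i || p.2)
        (p.1 ++ [a], a)) (out, fFwd w s n (a - 1)) =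
      (out ++ (PySem.List.pyRange a n 1).map (fFwd w s n), fFwd w s n (n - 1)) := by
  intro k
  induction k with
  | zero =>
    intro a out ha h0
    have : a = n := by omega
    subst this
    rw [PySem.List.pyRange_one_eq_nil (by omega)]
    simp
  | succ k ih =>
    intro a out ha h0
    have hlt : a < n := by omega
    rw [PySem.List.pyRange_one_cons hlt]
    simp only [List.foldl_cons, List.map_cons]
    have hv : fFwd w s n a = (!w a && (s a || fFwd w s n (a - 1))) := by
      rw [fFwd, dif_pos ⟨h0, hlt⟩]
    rw [← hv]
    have h2 := ih (a + 1) (out ++ [fFwd w s n a]) (by omega) (by omega)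
    simp only [add_sub_cancel_right] at h2
    rw [h2]
    simp

theorem sweep_fwd (w s : Int → Bool) (n : Int) :
    pvSweep (PySem.List.pyRange 0 n 1) w s =
      (PySem.List.pyRange 0 n 1).map (fFwd w s n) := by
  by_cases hn : 0 ≤ n
  · have h0 : fFwd w s n (0 - 1) = false := by
      rw [fFwd, dif_neg (by omega)]
    rw [pvSweep]
    have h := sweep_fwd_aux w s n n.toNat 0 [] (by omega) (by omega)
    rw [h0] at h
    rw [h]
    simp
  · rw [PySem.List.pyRange_one_eq_nil (by omega)]
    simp [pvSweep]

theorem sweep_bwd_aux (w s : Int → Bool) (n : Int) :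
    ∀ (k : Nat) (a : Int) (out : List Bool), a = (k : Int) - 1 → a < n →
    (PySem.List.pyRange a (-1) (-1)).foldl (fun (p : List Bool × Bool) i =>
        let a := !w i && (s i || p.2)
        (p.1 ++ [a], a)) (out, fBwd w s n (a + 1)) =
      (out ++ (PySem.List.pyRange a (-1) (-1)).map (fBwd w s n), fBwd w s n 0) := by
  intro k
  induction k with
  | zero =>
    intro a out ha h0
    have : a = -1 := by omega
    subst this
    rw [PySem.List.pyRange_neg_one_eq_nil (by omega)]
    simp
  | succ k ih =>
    intro a out ha hn
    have h0 : 0 ≤ a := by omega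
    rw [PySem.List.pyRange_neg_one_cons (by omega : (-1 : Int) < a)]
    simp only [List.foldl_cons, List.map_cons]
    have hv : fBwd w s n a = (!w a && (s a || fBwd w s n (a + 1))) := by
      rw [fBwd, dif_pos ⟨h0, hn⟩]
    rw [← hv]
    have h2 := ih (a - 1) (out ++ [fBwd w s n a]) (by omega) (by omega)
    simp only [sub_add_cancel] at h2
    rw [h2]
    simp

theorem rangeRev (n : Nat) :
    (PySem.List.pyRange ((n : Int) - 1) (-1) (-1)).reverse = PySem.List.pyRange 0 n 1 := by
  induction n with
  | zero =>
    rw [PySem.List.pyRange_neg_one_eq_nil (by omega), PySem.List.pyRange_one_eq_nil (by omega)]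
    rfl
  | succ k ih =>
    rw [PySem.List.pyRange_neg_one_cons (by push_cast; omega : (-1 : Int) < (k + 1 : Nat) - 1)]
    rw [show ((k + 1 : Nat) : Int) - 1 - 1 = ((k : Nat) : Int) - 1 by push_cast; ring]
    simp only [List.reverse_cons, ih]
    rw [show ((k + 1 : Nat) : Int) - 1 = (k : Int) by push_cast; ring]
    rw [show ((k + 1 : Nat) : Int) = (k : Int) + 1 by push_cast; ring]
    rw [PySem.List.pyRange_one_succ_right (by omega)]

theorem sweep_bwd (w s : Int → Bool) (n : Int) (hn : 0 ≤ n) :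
    (pvSweep (PySem.List.pyRange (n - 1) (-1) (-1)) w s).reverse =
      (PySem.List.pyRange 0 n 1).map (fBwd w s n) := by
  have hstart : fBwd w s n (n - 1 + 1) = false := by
    rw [fBwd, dif_neg (by omega)]
  rw [pvSweep]
  have h := sweep_bwd_aux w s n n.toNat (n - 1) [] (by omega) (by omega)
  rw [hstart] at h
  rw [h]
  simp only [List.nil_append]
  rw [← List.map_reverse]
  rw [show n - 1 = (n.toNat : Int) - 1 by omega]
  rw [rangeRev]
  rw [show ((n.toNat : Int)) = n by omega]

-- the four tables of Source B, as standalone terms (definitionally the let-bound L R U D)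
def pvTabL (board : List (List Int)) (gs : List (Int × Int)) : List (List Bool) :=
  (PySem.List.pyRange 0 (board.length : Int) 1).map (fun y =>
    pvSweep (PySem.List.pyRange 0 ((PySem.List.pyGetD board 0 []).length : Int) 1)
      (fun x => pvWall board y x) (fun x => pvExitH board gs (board.length : Int) y x))

def pvTabR (board : List (List Int)) (gs : List (Int × Int)) : List (List Bool) :=
  (PySem.List.pyRange 0 (board.length : Int) 1).map (fun y =>
    (pvSweep (PySem.List.pyRange (((PySem.List.pyGetD board 0 []).length : Int) - 1) (-1) (-1))
      (fun x => pvWall board y x) (fun x => pvExitH board gs (board.length : Int) y x)).reverse)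

def pvTabU (board : List (List Int)) (gs : List (Int × Int)) : List (List Bool) :=
  (PySem.List.pyRange 0 ((PySem.List.pyGetD board 0 []).length : Int) 1).map (fun x =>
    pvSweep (PySem.List.pyRange 0 (board.length : Int) 1)
      (fun y => pvWall board y x) (fun y => pvExitV board gs ((PySem.List.pyGetD board 0 []).length : Int) y x))

def pvTabD (board : List (List Int)) (gs : List (Int × Int)) : List (List Bool) :=
  (PySem.List.pyRange 0 ((PySem.List.pyGetD board 0 []).length : Int) 1).map (fun x =>
    (pvSweep (PySem.List.pyRange ((board.length : Int) - 1) (-1) (-1))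
      (fun y => pvWall board y x) (fun y => pvExitV board gs ((PySem.List.pyGetD board 0 []).length : Int) y x)).reverse)

theorem lookH_eq (board : List (List Int)) (gs : List (Int × Int)) (x y : Int)
    (hy0 : 0 ≤ y) (hy : y < (board.length : Int))
    (hx0 : 0 ≤ x) (hx : x < ((PySem.List.pyGetD board 0 []).length : Int)) :
    pvHasGoalOnWallSegment x y board gs true =
      ((decide (0 < x) && pvLook (pvTabL board gs) y (x - 1))
       || (decide (x < ((PySem.List.pyGetD board 0 []).length : Int) - 1)
            && pvLook (pvTabR board gs) y (x + 1))) := by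
  rw [pvHasGoalOnWallSegment]
  rw [if_pos rfl]
  rw [scanH_neg board gs (board.length : Int) ((PySem.List.pyGetD board 0 []).length : Int) y _ x (by omega)]
  rw [scanH_pos board gs (board.length : Int) ((PySem.List.pyGetD board 0 []).length : Int) y _ x (by omega)]
  rw [pvTabL, pvTabR, pvLook, pvLook]
  rw [PySem.List.pyGetD_map_pyRange_of_nonneg _ _ _ _ hy0 hy]
  rw [PySem.List.pyGetD_map_pyRange_of_nonneg _ _ _ _ hy0 hy]
  rw [sweep_fwd, sweep_bwd _ _ _ (by omega)]
  have e1 : (decide (0 < x) && PySem.List.pyGetD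
      ((PySem.List.pyRange 0 ((PySem.List.pyGetD board 0 []).length : Int) 1).map
        (fFwd (fun x => pvWall board y x)
          (fun x => pvExitH board gs (board.length : Int) y x)
          ((PySem.List.pyGetD board 0 []).length : Int))) (x - 1) false) =
      fFwd (fun x => pvWall board y x) (fun x => pvExitH board gs (board.length : Int) y x)
        ((PySem.List.pyGetD board 0 []).length : Int) (x - 1) := by
    by_cases h1 : 0 < x
    · rw [PySem.List.pyGetD_map_pyRange_of_nonneg _ _ _ _ (by omega) (by omega),
        decide_eq_true h1, Bool.true_and]
    · have hx' : x = 0 := by omega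
      subst hx'
      rw [fFwd, dif_neg (by omega)]
      simp
  have e2 : (decide (x < ((PySem.List.pyGetD board 0 []).length : Int) - 1) && PySem.List.pyGetD
      ((PySem.List.pyRange 0 ((PySem.List.pyGetD board 0 []).length : Int) 1).map
        (fBwd (fun x => pvWall board y x)
          (fun x => pvExitH board gs (board.length : Int) y x)
          ((PySem.List.pyGetD board 0 []).length : Int))) (x + 1) false) =
      fBwd (fun x => pvWall board y x) (fun x => pvExitH board gs (board.length : Int) y x)
        ((PySem.List.pyGetD board 0 []).length : Int) (x + 1) := by
    by_cases h2 : x < ((PySem.List.pyGetD board 0 []).length : Int) - 1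
    · rw [PySem.List.pyGetD_map_pyRange_of_nonneg _ _ _ _ (by omega) (by omega),
        decide_eq_true h2, Bool.true_and]
    · rw [fBwd, dif_neg (by omega)]
      simp [h2]
  rw [e1, e2]

theorem lookV_eq (board : List (List Int)) (gs : List (Int × Int)) (x y : Int)
    (hy0 : 0 ≤ y) (hy : y < (board.length : Int))
    (hx0 : 0 ≤ x) (hx : x < ((PySem.List.pyGetD board 0 []).length : Int)) :
    pvHasGoalOnWallSegment x y board gs false =
      ((decide (0 < y) && pvLook (pvTabU board gs) x (y - 1))
       || (decide (y < (board.length : Int) - 1)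
            && pvLook (pvTabD board gs) x (y + 1))) := by
  rw [pvHasGoalOnWallSegment]
  rw [if_neg (by simp)]
  rw [scanV_neg board gs (board.length : Int) ((PySem.List.pyGetD board 0 []).length : Int) x _ y (by omega)]
  rw [scanV_pos board gs (board.length : Int) ((PySem.List.pyGetD board 0 []).length : Int) x _ y (by omega)]
  rw [pvTabU, pvTabD, pvLook, pvLook]
  rw [PySem.List.pyGetD_map_pyRange_of_nonneg _ _ _ _ hx0 hx]
  rw [PySem.List.pyGetD_map_pyRange_of_nonneg _ _ _ _ hx0 hx]
  rw [sweep_fwd, sweep_bwd _ _ _ (by omega)]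
  have e1 : (decide (0 < y) && PySem.List.pyGetD
      ((PySem.List.pyRange 0 (board.length : Int) 1).map
        (fFwd (fun y => pvWall board y x)
          (fun y => pvExitV board gs ((PySem.List.pyGetD board 0 []).length : Int) y x)
          (board.length : Int))) (y - 1) false) =
      fFwd (fun y => pvWall board y x)
        (fun y => pvExitV board gs ((PySem.List.pyGetD board 0 []).length : Int) y x)
        (board.length : Int) (y - 1) := by
    by_cases h1 : 0 < y
    · rw [PySem.List.pyGetD_map_pyRange_of_nonneg _ _ _ _ (by omega) (by omega),
        decide_eq_true h1, Bool.true_and]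
    · have hy' : y = 0 := by omega
      subst hy'
      rw [fFwd, dif_neg (by omega)]
      simp
  have e2 : (decide (y < (board.length : Int) - 1) && PySem.List.pyGetD
      ((PySem.List.pyRange 0 (board.length : Int) 1).map
        (fBwd (fun y => pvWall board y x)
          (fun y => pvExitV board gs ((PySem.List.pyGetD board 0 []).length : Int) y x)
          (board.length : Int))) (y + 1) false) =
      fBwd (fun y => pvWall board y x)
        (fun y => pvExitV board gs ((PySem.List.pyGetD board 0 []).length : Int) y x)
        (board.length : Int) (y + 1) := by
    by_cases h2 : y < (board.length : Int) - 1
    · rw [PySem.List.pyGetD_map_pyRange_of_nonneg _ _ _ _ (by omega) (by omega),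
        decide_eq_true h2, Bool.true_and]
    · rw [fBwd, dif_neg (by omega)]
      simp [h2]
  rw [e1, e2]

-- foldl of Set.add over a flatMap = the nested fold
theorem foldl_add_flatMap {alpha beta : Type} [BEq alpha] (f : beta → List alpha) :
    ∀ (ys : List beta) (s : PySem.Set alpha),
    (ys.flatMap f).foldl PySem.Set.add s =
      ys.foldl (fun s y => (f y).foldl PySem.Set.add s) s := by
  intro ys
  induction ys with
  | nil => intro s; rfl
  | cons y ys ih =>
    intro s
    rw [List.flatMap_cons, List.foldl_append, List.foldl_cons, ih]

-- foldl of Set.add over a filtered, mapped row = the guarded fold of A's inner loop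
theorem foldl_add_filter_map {alpha : Type} [BEq alpha] (p : Int → Bool) (g : Int → alpha) :
    ∀ (xs : List Int) (s : PySem.Set alpha),
    (((xs.filter p).map g).foldl PySem.Set.add s) =
      xs.foldl (fun s x => if p x then PySem.Set.add s (g x) else s) s := by
  intro xs
  induction xs with
  | nil => intro s; rfl
  | cons x xs ih =>
    intro s
    rw [List.filter_cons, List.foldl_cons]
    cases hp : p x with
    | true => simp only [if_true]; rw [List.map_cons, List.foldl_cons, ih]
    | false => simp only [Bool.false_eq_true, if_false]; rw [ih]

-- Bool reshuffles used by the per-cell lemma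
theorem or_regroup (a b c e : Bool) : ((a || c) || (b || e)) = (a || b || c || e) := by
  cases a <;> cases b <;> cases c <;> cases e <;> rfl

theorem corner_factor (u d l r : Bool) :
    ((u && l) || (u && r) || (d && l) || (d && r)) = ((u || d) && (l || r)) := by
  cases u <;> cases d <;> cases l <;> cases r <;> rfl

-- the per-cell equality: A's loop body = "add iff B's comprehension keeps the cell"
theorem cell_eq (board : List (List Int)) (gs : List (Int × Int)) (x y : Int)
    (hy0 : 0 ≤ y) (hy : y < (board.length : Int))
    (hx0 : 0 ≤ x) (hx : x < ((PySem.List.pyGetD board 0 []).length : Int))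
    (dl : PySem.Set (Int × Int)) :
    (if pvWall board y x || PySem.Set.contains (PySem.Set.ofList gs) (x, y) then dl
     else
       if ((if 0 < y then pvWall board (y - 1) x else true) && (if 0 < x then pvWall board y (x - 1) else true)) || ((if 0 < y then pvWall board (y - 1) x else true) && (if x < ((PySem.List.pyGetD board 0 []).length : Int) - 1 then pvWall board y (x + 1) else true)) || ((if y < (board.length : Int) - 1 then pvWall board (y + 1) x else true) && (if 0 < x then pvWall board y (x - 1) else true)) || ((if y < (board.length : Int) - 1 then pvWall board (y + 1) x else true) && (if x < ((PySem.List.pyGetD board 0 []).length : Int) - 1 then pvWall board y (x + 1) else true)) then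
         PySem.Set.add dl (x, y)
       else if (if 0 < y then pvWall board (y - 1) x else true) || (if y < (board.length : Int) - 1 then pvWall board (y + 1) x else true) then
         if !pvHasGoalOnWallSegment x y board (PySem.Set.ofList gs) true then PySem.Set.add dl (x, y) else dl
       else if (if 0 < x then pvWall board y (x - 1) else true) || (if x < ((PySem.List.pyGetD board 0 []).length : Int) - 1 then pvWall board y (x + 1) else true) then
         if !pvHasGoalOnWallSegment x y board (PySem.Set.ofList gs) false then PySem.Set.add dl (x, y) else dl
       else dl) =
    (if (!pvWall board y x && !PySem.Set.contains (PySem.Set.ofList gs) (x, y)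
          && pvDead board (board.length : Int) ((PySem.List.pyGetD board 0 []).length : Int)
               (pvTabL board (PySem.Set.ofList gs)) (pvTabR board (PySem.Set.ofList gs))
               (pvTabU board (PySem.Set.ofList gs)) (pvTabD board (PySem.Set.ofList gs)) y x)
     then PySem.Set.add dl (x, y) else dl) := by
  cases hw : pvWall board y x with
  | true => simp
  | false =>
    cases hg : PySem.Set.contains (PySem.Set.ofList gs) (x, y) with
    | true => simp
    | false =>
      simp only [Bool.false_or, Bool.false_eq_true, if_false, Bool.not_false, Bool.true_and]
      have hup : (if 0 < y then pvWall board (y - 1) x else true) =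
          (decide (y = 0) || pvWall board (y - 1) x) := by
        by_cases h : 0 < y
        · rw [if_pos h, decide_eq_false (by omega : ¬ y = 0), Bool.false_or]
        · rw [if_neg h, decide_eq_true (by omega : y = 0), Bool.true_or]
      have hdown : (if y < (board.length : Int) - 1 then pvWall board (y + 1) x else true) =
          (decide (y = (board.length : Int) - 1) || pvWall board (y + 1) x) := by
        by_cases h : y < (board.length : Int) - 1
        · rw [if_pos h, decide_eq_false (by omega : ¬ y = (board.length : Int) - 1), Bool.false_or]
        · rw [if_neg h, decide_eq_true (by omega : y = (board.length : Int) - 1), Bool.true_or]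
      have hleft : (if 0 < x then pvWall board y (x - 1) else true) =
          (decide (x = 0) || pvWall board y (x - 1)) := by
        by_cases h : 0 < x
        · rw [if_pos h, decide_eq_false (by omega : ¬ x = 0), Bool.false_or]
        · rw [if_neg h, decide_eq_true (by omega : x = 0), Bool.true_or]
      have hright : (if x < ((PySem.List.pyGetD board 0 []).length : Int) - 1 then pvWall board y (x + 1) else true) =
          (decide (x = ((PySem.List.pyGetD board 0 []).length : Int) - 1) || pvWall board y (x + 1)) := by
        by_cases h : x < ((PySem.List.pyGetD board 0 []).length : Int) - 1
        · rw [if_pos h, decide_eq_false (by omega), Bool.false_or]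
        · rw [if_neg h, decide_eq_true (by omega), Bool.true_or]
      simp only [hup, hdown, hleft, hright, corner_factor]
      rw [pvDead]
      rw [or_regroup, or_regroup]
      -- name the two factored conditions
      cases hbv : (decide (y = 0) || decide (y = (board.length : Int) - 1)
          || pvWall board (y - 1) x || pvWall board (y + 1) x) with
      | true =>
        cases hbh : (decide (x = 0) || decide (x = ((PySem.List.pyGetD board 0 []).length : Int) - 1)
            || pvWall board y (x - 1) || pvWall board y (x + 1)) with
        | true => simp
        | false =>
          -- line case along the row; ¬bh gives 0 < x < cols - 1, so the guards are true
          simp only [Bool.and_false, Bool.false_eq_true, if_false, if_true]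
          rw [lookH_eq board (PySem.Set.ofList gs) x y hy0 hy hx0 hx]
          have hb := hbh
          simp only [Bool.or_eq_false_iff, decide_eq_false_iff_not] at hb
          rw [decide_eq_true (by omega : 0 < x), Bool.true_and,
            decide_eq_true (by omega : x < ((PySem.List.pyGetD board 0 []).length : Int) - 1),
            Bool.true_and]
      | false =>
        cases hbh : (decide (x = 0) || decide (x = ((PySem.List.pyGetD board 0 []).length : Int) - 1)
            || pvWall board y (x - 1) || pvWall board y (x + 1)) with
        | false => simp
        | true =>
          simp only [Bool.false_and, Bool.false_eq_true, if_false, if_true]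
          rw [lookV_eq board (PySem.Set.ofList gs) x y hy0 hy hx0 hx]
          have hb := hbv
          simp only [Bool.or_eq_false_iff, decide_eq_false_iff_not] at hb
          rw [decide_eq_true (by omega : 0 < y), Bool.true_and,
            decide_eq_true (by omega : y < (board.length : Int) - 1),
            Bool.true_and]

theorem main_eq (board : List (List Int)) (goals : List (Int × Int)) :
    get_static_deadlocks board goals = get_static_deadlocks_alt board goals := by
  rw [get_static_deadlocks]
  show _ = get_static_deadlocks_alt board goals
  have halt : get_static_deadlocks_alt board goals =
      PySem.Set.ofList ((PySem.List.pyRange 0 (board.length : Int) 1).flatMap (fun y =>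
        ((PySem.List.pyRange 0 ((PySem.List.pyGetD board 0 []).length : Int) 1).filter (fun x =>
          !pvWall board y x && !PySem.Set.contains (PySem.Set.ofList goals) (x, y)
            && pvDead board (board.length : Int) ((PySem.List.pyGetD board 0 []).length : Int)
                 (pvTabL board (PySem.Set.ofList goals)) (pvTabR board (PySem.Set.ofList goals))
                 (pvTabU board (PySem.Set.ofList goals)) (pvTabD board (PySem.Set.ofList goals)) y x)).map
          (fun x => (x, y)))) := rfl
  rw [halt]
  refine Eq.trans ?_ (PySem.Set.ofList_eq_foldl _).symm
  rw [foldl_add_flatMap]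
  apply PySem.List.foldl_congr_mem
  intro dl y hy
  rw [PySem.List.mem_pyRange_one] at hy
  rw [foldl_add_filter_map]
  apply PySem.List.foldl_congr_mem
  intro dl2 x hx
  rw [PySem.List.mem_pyRange_one] at hx
  exact cell_eq board goals x y hy.1 hy.2 hx.1 hx.2 dl2

-- ===== VERDICT (by name: the statement is the Claim_ definition above) =====
theorem get_static_deadlocks_spec : Claim_equal_get_static_deadlocks := by
  intro board goals _ _
  show get_static_deadlocks board goals = get_static_deadlocks_alt board goals
  exact main_eq board goals
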